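-- pv_equiv track=rewrite | github.com/zagara2/TopCoderSolutions | CarrotBoxes/CarrotBoxes.py | theIndex
-- ===== SOURCE A (Python) =====
-- def theIndex(carrots,amount):
--     lastbox = 0
--     while amount > 0:
--         maxboxindex = carrots.index(max(carrots)) #index of box with the most carrots
--         carrots[maxboxindex] = carrots[maxboxindex] - 1
--         lastbox = maxboxindex #makes a note of what box she just ate from
--         amount = amount -1 #how many carrots are left?
--     return lastbox
-- ===== SOURCE B (Python) =====
-- def theIndex(carrots, amount):
--     # Note: A mutates `carrots` in place; B does not (equivalence is about the return value).
--     if amount <= 0: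
--         return 0
--     vals = list(carrots)
--     last = 0
--     while amount > 0:
--         m = max(vals)
--         idxs = [i for i, v in enumerate(vals) if v == m]
--         cnt = len(idxs)
--         rest = [v for v in vals if v < m]
--         if rest:
--             d = m - max(rest)
--             if d * cnt <= amount:
--                 vals = [v - d if v == m else v for v in vals]
--                 amount -= d * cnt
--                 last = idxs[-1]
--                 continue
--         # everything remaining happens cycling through idxs
--         r = amount % cnt
--         last = idxs[-1] if r == 0 else idxs[r - 1]
--         amount = 0
--     return last
-- ===== Notes on version B (the rewrite author's own statement) =====
-- stated objective: faster
-- what changed: A eats one carrot per iteration (recomputing max and index each time, O(amount*n)); B drops the whole tie set of top boxes down to the second-largest value in one bulk step per distinct level and resolves the final partial round with modular arithmetic over the tie indices, so its cost is independent of amount.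
import Mathlib
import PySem

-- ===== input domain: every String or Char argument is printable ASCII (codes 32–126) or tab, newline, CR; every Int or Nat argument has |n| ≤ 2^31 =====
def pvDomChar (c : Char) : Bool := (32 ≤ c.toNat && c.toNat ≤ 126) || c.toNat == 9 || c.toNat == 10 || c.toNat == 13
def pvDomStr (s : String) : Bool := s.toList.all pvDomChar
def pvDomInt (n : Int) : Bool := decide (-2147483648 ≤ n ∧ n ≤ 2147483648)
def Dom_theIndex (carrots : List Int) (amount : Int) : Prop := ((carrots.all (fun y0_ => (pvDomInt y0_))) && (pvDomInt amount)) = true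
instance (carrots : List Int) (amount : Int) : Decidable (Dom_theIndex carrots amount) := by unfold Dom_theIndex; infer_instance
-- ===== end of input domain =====

-- B replaces A's one-carrot-at-a-time loop by bulk level-drops (one iteration per distinct
-- value), resolving the final partial round by modular arithmetic; A mutates `carrots` in
-- place, B does not — the equivalence proved here is about the return value only.

-- ===== PORT A =====
-- while amount > 0: j = carrots.index(max(carrots)); carrots[j] -= 1; lastbox = j; amount -= 1
-- fuel = amount.toNat (the loop runs exactly amount times when amount > 0);
-- the `none` branches are where Python's max()/index() would raise (empty list; unreachable under Pre_).
def theIndexLoop (fuel : Nat) (carrots : List Int) (lastbox : Int) : Int :=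
  match fuel with
  | 0 => lastbox
  | f + 1 =>
    match PySem.List.max? carrots (fun y => y) with
    | none => lastbox
    | some m =>
      match PySem.List.index? carrots m with
      | none => lastbox
      | some j =>
        theIndexLoop f (PySem.List.pySetD carrots (j : Int) (PySem.List.pyGetD carrots (j : Int) 0 - 1)) (j : Int)

def theIndex (carrots : List Int) (amount : Int) : Int :=
  theIndexLoop amount.toNat carrots 0

-- ===== PORT B =====
-- one iteration per distinct top value: drop the whole tie set `idxs` by d = m - max(rest)
-- at once; when the remaining amount no longer covers a full drop, the answer is read off
-- by amount mod cnt.  The `none` branches are unreachable (max of a nonempty list); the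
-- conjunct `0 < d * cnt` is a totality guard (always true there: d ≥ 1, cnt ≥ 1) that
-- lets the recursion terminate on amount.toNat.
def theIndexLoopB (vals : List Int) (amount : Int) (last : Int) : Int :=
  if _h : 0 < amount then
    match PySem.List.max? vals (fun y => y) with
    | none => last
    | some m =>
      let idxs := ((PySem.List.enumerate vals 0).filter (fun p => p.2 == m)).map Prod.fst
      let cnt : Int := idxs.length
      let rest := vals.filter (fun v => decide (v < m))
      let fin : Int :=
        let r := PySem.Int.mod amount cnt
        if r == 0 then PySem.List.pyGetD idxs (-1) 0 else PySem.List.pyGetD idxs (r - 1) 0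
      if rest ≠ [] then
        match PySem.List.max? rest (fun y => y) with
        | none => fin
        | some m2 =>
          let d := m - m2
          if hc : d * cnt ≤ amount ∧ 0 < d * cnt then
            theIndexLoopB (vals.map (fun v => if v == m then v - d else v)) (amount - d * cnt)
              (PySem.List.pyGetD idxs (-1) 0)
          else fin
      else fin
  else last
termination_by amount.toNat
decreasing_by
  simp only [idxs, cnt, d] at hc
  omega

def theIndex_alt (carrots : List Int) (amount : Int) : Int :=
  if amount ≤ 0 then 0 else theIndexLoopB carrots amount 0

-- ===== PRECONDITION & SPEC =====
-- Pre_ excludes only the inputs where A raises: max([]) is a ValueError, reached iff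
-- carrots = [] and amount > 0 (B raises there too).
def Pre_theIndex (carrots : List Int) (amount : Int) : Prop := 0 < amount → carrots ≠ []
instance (carrots : List Int) (amount : Int) : Decidable (Pre_theIndex carrots amount) := by
  unfold Pre_theIndex; infer_instance
def pvWitness_theIndex : List Int × Int := ([3, 1, 3], 5)

def Spec_theIndex (carrots : List Int) (amount : Int) (out : Int) : Prop := out = theIndex_alt carrots amount
instance (carrots : List Int) (amount : Int) (out : Int) : Decidable (Spec_theIndex carrots amount out) := by unfold Spec_theIndex; infer_instance

-- ===== CLAIM (what is proved, stated in full; the proofs are below) =====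
def Claim_equal_theIndex : Prop := ∀ (carrots : List Int) (amount : Int), Dom_theIndex carrots amount → Pre_theIndex carrots amount → Spec_theIndex carrots amount (theIndex carrots amount)

-- ===== LEMMAS AND PROOFS =====

def pvTies (vals : List Int) (m : Int) : List Nat :=
  (List.range vals.length).filter (fun i => decide (vals.getD i 0 = m))

lemma pvTies_mem_iff {vals : List Int} {m : Int} {i : Nat} :
    i ∈ pvTies vals m ↔ i < vals.length ∧ vals.getD i 0 = m := by
  simp [pvTies, List.mem_filter, List.mem_range]

lemma pvTies_nodup (vals : List Int) (m : Int) : (pvTies vals m).Nodup :=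
  (List.nodup_range).filter _

lemma pvTies_facts {vals : List Int} {m : Int} {j : Nat} {rest : List Nat}
    (h : pvTies vals m = j :: rest) :
    j < vals.length ∧ vals.getD j 0 = m ∧ (∀ i < j, vals.getD i 0 ≠ m) ∧ j ∉ rest := by
  have hmem : j ∈ pvTies vals m := by rw [h]; exact List.mem_cons_self
  have h1 := pvTies_mem_iff.mp hmem
  have hnd := pvTies_nodup vals m
  rw [h] at hnd
  obtain ⟨l₁, l₂, hsplit, hnot, hp, -⟩ := List.filter_eq_cons_iff.mp h
  have hlen : l₁.length < vals.length := by
    have := congrArg List.length hsplit; simp at this; omega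
  have hj : j = l₁.length := by
    have h2 : (List.range vals.length)[l₁.length]? = some j := by
      rw [hsplit, List.getElem?_append_right le_rfl]; simp
    rw [List.getElem?_range hlen] at h2
    exact (Option.some_inj.mp h2).symm
  have hl1 : l₁ = List.range j := by
    have h3 : l₁ = (List.range vals.length).take l₁.length := by
      rw [hsplit, List.take_left]
    rw [h3, List.take_range]
    congr 1
    omega
  refine ⟨h1.1, h1.2, ?_, (List.nodup_cons.mp hnd).1⟩
  intro i hij hpm
  exact hnot i (by rw [hl1]; exact List.mem_range.mpr hij) (by simpa using hpm)

lemma pvTies_mem2 {vals : List Int} {m : Int} {j : Nat} {rest : List Nat}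
    (h : pvTies vals m = j :: rest) : m ∈ vals := by
  obtain ⟨hj, hv, -, -⟩ := pvTies_facts h
  rw [List.getD_eq_getElem _ _ hj] at hv
  exact hv ▸ List.getElem_mem hj

lemma pvMax_eq {vals : List Int} {m : Int} (hmem : m ∈ vals) (hle : ∀ v ∈ vals, v ≤ m) :
    PySem.List.max? vals (fun y => y) = some m := by
  cases hx : PySem.List.max? vals (fun y => y) with
  | none => exact absurd ((PySem.List.max?_eq_none_iff vals _).mp hx) (List.ne_nil_of_mem hmem)
  | some x =>
    have h1 : m ≤ x := PySem.List.max?_isMax hx m hmem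
    have h2 : x ≤ m := hle x (PySem.List.max?_mem hx)
    rw [Option.some_inj]
    omega

lemma pvIndex_eq {vals : List Int} {m : Int} {j : Nat} {rest : List Nat}
    (h : pvTies vals m = j :: rest) :
    PySem.List.index? vals m = some j := by
  obtain ⟨hj, hv, hfirst, -⟩ := pvTies_facts h
  rw [PySem.List.index?_eq_some_iff]
  refine ⟨vals.take j, vals.drop (j + 1), ?_, by simp [hj.le], ?_⟩
  · rw [List.getD_eq_getElem _ _ hj] at hv
    conv_lhs => rw [← List.take_append_drop j vals]
    rw [List.drop_eq_getElem_cons hj, hv]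
  · intro hc
    obtain ⟨i, hi, hiv⟩ := List.mem_take_iff_getElem.mp hc
    exact hfirst i (by omega) (by rw [List.getD_eq_getElem _ _ (by omega)]; exact hiv)

lemma pvTies_set {vals : List Int} {m : Int} {j : Nat} {rest : List Nat}
    (h : pvTies vals m = j :: rest) :
    pvTies (vals.set j (m - 1)) m = rest := by
  obtain ⟨hj, hv, -, hjr⟩ := pvTies_facts h
  unfold pvTies
  rw [List.length_set]
  have hcg : ∀ i ∈ List.range vals.length,
      (decide ((vals.set j (m - 1)).getD i 0 = m)) =
        (decide (¬ i = j) && decide (vals.getD i 0 = m)) := by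
    intro i hi
    have hi' : i < vals.length := List.mem_range.mp hi
    by_cases hij : i = j
    · subst hij
      rw [List.getD_eq_getElem _ _ (by simpa using hi'), List.getElem_set_self]
      simp
    · rw [List.getD_eq_getElem _ _ (by simpa using hi'), List.getElem_set_ne (by omega),
        ← List.getD_eq_getElem _ 0 hi']
      simp [hij]
  rw [List.filter_congr hcg, ← List.filter_filter]
  have : (List.range vals.length).filter (fun i => decide (vals.getD i 0 = m)) = pvTies vals m := rfl
  rw [this, h]
  rw [List.filter_cons]
  simp only [decide_not]
  simp
  intro a ha
  rintro rfl
  exact hjr ha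

lemma pvMap_id {vals : List Int} {m : Int} (h : pvTies vals m = []) :
    vals.map (fun v => if v = m then v - 1 else v) = vals := by
  have hnm : ∀ v ∈ vals, v ≠ m := by
    intro v hv hveq
    obtain ⟨i, hi, hvi⟩ := List.mem_iff_getElem.mp hv
    have : i ∈ pvTies vals m := pvTies_mem_iff.mpr ⟨hi, by rw [List.getD_eq_getElem _ _ hi, hvi, hveq]⟩
    simp [h] at this
  rw [List.map_congr_left (fun v hv => if_neg (hnm v hv)), List.map_id']

lemma pvMap_set {vals : List Int} {m : Int} {j : Nat} {rest : List Nat}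
    (h : pvTies vals m = j :: rest) :
    (vals.set j (m - 1)).map (fun v => if v = m then v - 1 else v)
      = vals.map (fun v => if v = m then v - 1 else v) := by
  obtain ⟨hj, hv, -, -⟩ := pvTies_facts h
  rw [List.getD_eq_getElem _ _ hj] at hv
  rw [List.map_set, if_neg (by omega : ¬ ((m:Int) - 1 = m))]
  have : (vals.map (fun v => if v = m then v - 1 else v))[j]'(by simpa using hj) = m - 1 := by
    rw [List.getElem_map, hv, if_pos rfl]
  rw [← this, List.set_getElem_self]

lemma pvStep {vals : List Int} {m : Int} {j : Nat} {rest : List Nat} {t : Nat} {last : Int}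
    (hle : ∀ v ∈ vals, v ≤ m) (h : pvTies vals m = j :: rest) :
    theIndexLoop (t + 1) vals last = theIndexLoop t (vals.set j (m - 1)) (j : Int) := by
  obtain ⟨hj, hv, -, -⟩ := pvTies_facts h
  simp only [theIndexLoop, pvMax_eq (pvTies_mem2 h) hle, pvIndex_eq h,
    PySem.List.pyGetD_natCast, PySem.List.pySetD_natCast]
  rw [hv]

lemma pvTies_map_dec {vals : List Int} {m : Int} (d : Int)
    (hlt : ∀ v ∈ vals, v ≠ m → v < m - d) (hd : 0 < d) :
    pvTies (vals.map (fun v => if v = m then v - d else v)) (m - d) = pvTies vals m := by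
  unfold pvTies
  rw [List.length_map]
  apply List.filter_congr
  intro i hi
  have hi' : i < vals.length := List.mem_range.mp hi
  rw [List.getD_eq_getElem _ _ (by simpa using hi'), List.getElem_map,
    ← List.getD_eq_getElem _ 0 hi']
  by_cases hm : vals.getD i 0 = m
  · rw [hm]; simp
  · rw [if_neg hm]
    have hmem : vals.getD i 0 ∈ vals := by
      rw [List.getD_eq_getElem _ _ hi']; exact List.getElem_mem hi'
    have := hlt _ hmem hm
    simp only [decide_eq_decide]
    constructor
    · intro hq; omega
    · intro hq; omega

lemma pvRound (idxs : List Nat) : ∀ (vals : List Int) (t : Nat) (last m : Int),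
    (∀ v ∈ vals, v ≤ m) → pvTies vals m = idxs → idxs ≠ [] → idxs.length ≤ t →
    theIndexLoop t vals last
      = theIndexLoop (t - idxs.length) (vals.map (fun v => if v = m then v - 1 else v))
          ((idxs.getLast?.getD 0 : Nat) : Int) := by
  induction idxs with
  | nil => intro _ _ _ _ _ _ hne _; exact absurd rfl hne
  | cons j rest ih =>
    intro vals t last m hle hties _ hlen
    obtain ⟨t', rfl⟩ : ∃ t', t = t' + 1 := ⟨t - 1, by simp at hlen; omega⟩
    rw [pvStep hle hties]
    have hle' : ∀ v ∈ vals.set j (m - 1), v ≤ m := by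
      intro v hv
      rcases List.mem_or_eq_of_mem_set hv with h | h
      · exact hle v h
      · omega
    have hties' : pvTies (vals.set j (m - 1)) m = rest := pvTies_set hties
    by_cases hr : rest = []
    · subst hr
      have h1 := pvMap_id hties'
      have h2 := pvMap_set hties
      rw [← h2, h1]
      simp
    · have hrec := ih (vals.set j (m - 1)) t' (j : Int) m hle' hties' hr
        (by simp at hlen ⊢; omega)
      rw [hrec, pvMap_set hties]
      have hlast : (j :: rest).getLast? = rest.getLast? := by
        cases rest with
        | nil => exact absurd rfl hr
        | cons a l => simp [List.getLast?_cons_cons]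
      rw [hlast]
      congr 1
      simp

lemma pvRoundPart (idxs : List Nat) : ∀ (vals : List Int) (t : Nat) (last m : Int),
    (∀ v ∈ vals, v ≤ m) → pvTies vals m = idxs → 0 < t → t < idxs.length →
    theIndexLoop t vals last = ((idxs.getD (t - 1) 0 : Nat) : Int) := by
  induction idxs with
  | nil => intro _ t _ _ _ _ h1 h2; simp at h2
  | cons j rest ih =>
    intro vals t last m hle hties ht hlt
    obtain ⟨t', rfl⟩ : ∃ t', t = t' + 1 := ⟨t - 1, by omega⟩
    rw [pvStep hle hties]
    by_cases ht0 : t' = 0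
    · subst ht0
      simp [theIndexLoop]
    · have hle' : ∀ v ∈ vals.set j (m - 1), v ≤ m := by
        intro v hv
        rcases List.mem_or_eq_of_mem_set hv with h | h
        · exact hle v h
        · omega
      have hrec := ih (vals.set j (m - 1)) t' (j : Int) m hle' (pvTies_set hties)
        (by omega) (by simp at hlt; omega)
      rw [hrec]
      obtain ⟨t'', rfl⟩ : ∃ t'', t' = t'' + 1 := ⟨t' - 1, by omega⟩
      simp

lemma pvDeep (d : Nat) : ∀ (vals : List Int) (t : Nat) (last m : Int),
    0 < d → (∀ v ∈ vals, v ≤ m) → (∀ v ∈ vals, v ≠ m → v ≤ m - d) →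
    pvTies vals m ≠ [] → d * (pvTies vals m).length ≤ t →
    theIndexLoop t vals last
      = theIndexLoop (t - d * (pvTies vals m).length)
          (vals.map (fun v => if v = m then v - (d : Int) else v))
          (((pvTies vals m).getLast?.getD 0 : Nat) : Int) := by
  induction d with
  | zero => intro _ _ _ _ h; omega
  | succ d ih =>
    intro vals t last m _ hle hothers hne hcnt
    rcases Nat.eq_zero_or_pos d with rfl | hd
    · simpa using pvRound (pvTies vals m) vals t last m hle rfl hne (by simpa using hcnt)
    · have hcnt1 : (pvTies vals m).length ≤ t := by nlinarith
      rw [pvRound (pvTies vals m) vals t last m hle rfl hne hcnt1]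
      set f1 : Int → Int := fun v => if v = m then v - 1 else v with hf1
      have hties1 : pvTies (vals.map f1) (m - 1) = pvTies vals m := by
        apply pvTies_map_dec (1 : Int) _ (by omega)
        intro v hv hvm
        have := hothers v hv hvm
        push_cast at this ⊢
        omega
      have hle1 : ∀ v ∈ vals.map f1, v ≤ m - 1 := by
        intro v hv
        obtain ⟨w, hw, rfl⟩ := List.mem_map.mp hv
        by_cases hwm : w = m
        · simp [hf1, hwm]
        · have := hothers w hw hwm
          simp only [hf1, if_neg hwm]
          push_cast at this
          omega
      have hothers1 : ∀ v ∈ vals.map f1, v ≠ m - 1 → v ≤ m - 1 - d := by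
        intro v hv hvm
        obtain ⟨w, hw, rfl⟩ := List.mem_map.mp hv
        by_cases hwm : w = m
        · simp [hf1, hwm] at hvm
        · have := hothers w hw hwm
          simp only [hf1, if_neg hwm] at hvm ⊢
          push_cast at this
          omega
      have hrec := ih (vals.map f1) (t - (pvTies vals m).length)
        (((pvTies vals m).getLast?.getD 0 : Nat) : Int) (m - 1) hd hle1 hothers1
        (by rw [hties1]; exact hne)
        (by rw [hties1]
            have he : (d + 1) * (pvTies vals m).length
                = d * (pvTies vals m).length + (pvTies vals m).length := by ring
            omega)
      rw [hties1] at hrec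
      rw [hrec]
      have hmap : (vals.map f1).map (fun v => if v = m - 1 then v - (d : Int) else v)
          = vals.map (fun v => if v = m then v - ((d + 1 : Nat) : Int) else v) := by
        rw [List.map_map]
        apply List.map_congr_left
        intro w hw
        by_cases hwm : w = m
        · simp [hf1, hwm]
          ring
        · have := hothers w hw hwm
          have hwm1 : w ≠ m - 1 := by push_cast at this; omega
          simp [hf1, if_neg hwm, if_neg hwm1]
      rw [hmap]
      congr 1
      have he : (d + 1) * (pvTies vals m).length
          = d * (pvTies vals m).length + (pvTies vals m).length := by ring
      omega

lemma pvTies_cons (v : Int) (vs : List Int) (m : Int) :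
    pvTies (v :: vs) m = (if v = m then [0] else []) ++ (pvTies vs m).map (· + 1) := by
  unfold pvTies
  rw [List.length_cons, List.range_succ_eq_map, List.filter_cons]
  simp only [List.getD_cons_zero]
  rw [List.filter_map]
  by_cases hv : v = m <;> simp [hv, Function.comp_def, Nat.succ_eq_add_one] <;> rfl

lemma pvCode_aux (vals : List Int) (m : Int) : ∀ (s : Int),
    ((PySem.List.enumerate vals s).filter (fun p => p.2 == m)).map Prod.fst
      = (pvTies vals m).map (fun i : Nat => s + (i : Int)) := by
  induction vals with
  | nil => intro s; simp [PySem.List.enumerate_nil, pvTies]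
  | cons v vs ih =>
    intro s
    rw [PySem.List.enumerate_cons, List.filter_cons]
    by_cases hv : v = m
    · rw [if_pos (by simp [hv]), List.map_cons, ih (s + 1), pvTies_cons, if_pos hv]
      simp only [List.map_append, List.map_map, List.map_cons, List.map_nil]
      congr 1
      · simp
      · apply List.map_congr_left
        intro i _
        simp only [Function.comp_apply]
        push_cast
        ring
    · rw [if_neg (by simp [hv]), ih (s + 1), pvTies_cons, if_neg hv]
      simp only [List.nil_append, List.map_map]
      apply List.map_congr_left
      intro i _
      simp only [Function.comp_apply]
      push_cast
      ring

lemma pvCode_ties (vals : List Int) (m : Int) :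
    ((PySem.List.enumerate vals 0).filter (fun p => p.2 == m)).map Prod.fst
      = (pvTies vals m).map (fun i : Nat => (i : Int)) := by
  have := pvCode_aux vals m 0
  simpa using this

lemma pvLast (l : List Nat) (h : l ≠ []) :
    PySem.List.pyGetD (l.map (fun i : Nat => (i : Int))) (-1) 0 = ((l.getLast?.getD 0 : Nat) : Int) := by
  have hm : l.map (fun i : Nat => (i : Int)) ≠ [] := by simpa using h
  rw [PySem.List.pyGetD_neg_one _ _ hm]
  rw [List.getLast_map]
  rw [List.getLast?_eq_some_getLast h]
  simp

lemma pvAt (l : List Nat) (r : Nat) (h0 : 0 < r) (hr : r ≤ l.length) :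
    PySem.List.pyGetD (l.map (fun i : Nat => (i : Int))) ((r : Int) - 1) 0
      = ((l.getD (r - 1) 0 : Nat) : Int) := by
  rw [PySem.List.pyGetD_eq_getElem _ _ (by omega) (by simp; omega)]
  have h2 : ((r : Int) - 1).toNat = r - 1 := by omega
  simp only [h2, List.getElem_map]
  rw [List.getD_eq_getElem _ _ (by omega : r - 1 < l.length)]

lemma pvTies_ne_nil {vals : List Int} {x : Int} (hmem : x ∈ vals) : pvTies vals x ≠ [] := by
  obtain ⟨i, hi, hvi⟩ := List.mem_iff_getElem.mp hmem
  intro h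
  have : i ∈ pvTies vals x := pvTies_mem_iff.mpr ⟨hi, by rw [List.getD_eq_getElem _ _ hi, hvi]⟩
  simp [h] at this

lemma pvFinal (vals : List Int) (t : Nat) (last x : Int)
    (hle : ∀ v ∈ vals, v ≤ x) (hxmem : x ∈ vals) (htpos : 0 < t)
    (Hoth : ∀ v ∈ vals, v ≠ x → v ≤ x - ((t / (pvTies vals x).length : Nat) : Int) - 1) :
    theIndexLoop t vals last =
      if t % (pvTies vals x).length = 0
      then (((pvTies vals x).getLast?.getD 0 : Nat) : Int)
      else (((pvTies vals x).getD (t % (pvTies vals x).length - 1) 0 : Nat) : Int) := by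
  have htne : pvTies vals x ≠ [] := pvTies_ne_nil hxmem
  have hcpos : 0 < (pvTies vals x).length := List.length_pos_iff.mpr htne
  obtain ⟨q, hq⟩ : ∃ q, q = t / (pvTies vals x).length := ⟨_, rfl⟩
  obtain ⟨r, hr⟩ : ∃ r, r = t % (pvTies vals x).length := ⟨_, rfl⟩
  have hdm : q * (pvTies vals x).length + r = t := by
    rw [hq, hr]; exact Nat.div_add_mod' t _
  have hrc : r < (pvTies vals x).length := hr ▸ Nat.mod_lt _ hcpos
  rw [← hq] at Hoth
  rw [← hr]
  by_cases hr0 : r = 0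
  · rw [if_pos hr0]
    have hqpos : 0 < q := by
      rcases Nat.eq_zero_or_pos q with rfl | h0
      · simp at hdm; omega
      · exact h0
    have hdeep := pvDeep q vals t last x hqpos hle
      (fun v hv hvx => by have h5 := Hoth v hv hvx; omega) htne (by omega)
    rw [hdeep]
    have h0 : t - q * (pvTies vals x).length = 0 := by omega
    rw [h0]
    rfl
  · rw [if_neg hr0]
    by_cases hq0 : q = 0
    · subst hq0
      simp only [Nat.zero_mul, Nat.zero_add] at hdm
      have hpart := pvRoundPart (pvTies vals x) vals t last x hle rfl htpos (by omega)
      rw [hpart]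
      rw [hdm]
    · have hqpos : 0 < q := by omega
      have hdeep := pvDeep q vals t last x hqpos hle
        (fun v hv hvx => by have h5 := Hoth v hv hvx; omega) htne (by omega)
      rw [hdeep]
      have hle1 : ∀ v ∈ vals.map (fun v => if v = x then v - (q : Int) else v), v ≤ x - q := by
        intro v hv
        obtain ⟨w, hw, rfl⟩ := List.mem_map.mp hv
        by_cases hwx : w = x
        · simp [hwx]
        · have h5 := Hoth w hw hwx
          rw [if_neg hwx]
          omega
      have hties1 : pvTies (vals.map (fun v => if v = x then v - (q : Int) else v)) (x - q)
          = pvTies vals x := by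
        apply pvTies_map_dec (q : Int) _ (by exact_mod_cast hqpos)
        intro v hv hvx
        have h5 := Hoth v hv hvx
        omega
      have hpart := pvRoundPart (pvTies vals x)
        (vals.map (fun v => if v = x then v - (q : Int) else v)) (t - q * (pvTies vals x).length)
        (((pvTies vals x).getLast?.getD 0 : Nat) : Int) (x - q)
        hle1 hties1 (by omega) (by omega)
      rw [hpart]
      have hidx : t - q * (pvTies vals x).length = r := by omega
      rw [hidx]

lemma pvMain (fuel : Nat) : ∀ (vals : List Int) (amount last : Int),
    vals ≠ [] → 0 < amount → amount.toNat ≤ fuel →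
    theIndexLoop amount.toNat vals last = theIndexLoopB vals amount last := by
  induction fuel with
  | zero => intro vals amount last _ h1 h2; omega
  | succ fuel ih =>
    intro vals amount last hne hpos hfuel
    obtain ⟨x, hx⟩ : ∃ x, PySem.List.max? vals (fun y => y) = some x := by
      cases h : PySem.List.max? vals (fun y => y) with
      | none => exact absurd ((PySem.List.max?_eq_none_iff vals _).mp h) hne
      | some x => exact ⟨x, rfl⟩
    have hle : ∀ v ∈ vals, v ≤ x := by
      intro v hv; exact PySem.List.max?_isMax hx v hv
    have hxmem := PySem.List.max?_mem hx
    have htne : pvTies vals x ≠ [] := pvTies_ne_nil hxmem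
    set T := pvTies vals x with hT
    set c := T.length with hc
    have hcpos : 0 < c := by
      cases hT2 : T with
      | nil => exact absurd hT2 htne
      | cons a l => simp [hc, hT2]
    set t := amount.toNat with ht
    have htpos : 0 < t := by omega
    have hamount : amount = (t : Int) := by omega
    rw [theIndexLoopB, dif_pos hpos, hx]
    simp only [pvCode_ties, ← hT, List.length_map]
    have hmodeq : PySem.Int.mod amount (↑T.length : Int) = ((t % c : Nat) : Int) := by
      rw [hamount, ← hc]
      exact PySem.Int.mod_natCast t c
    have hTlen : (↑T.length : Int) = (c : Int) := by rw [← hc]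
    -- common closer for the "no full bulk drop" branches
    have hfinal : ∀ (Hoth : ∀ v ∈ vals, v ≠ x → v ≤ x - ((t / c : Nat) : Int) - 1),
        theIndexLoop t vals last
          = if (PySem.Int.mod amount (↑T.length : Int) == 0) = true
            then PySem.List.pyGetD (T.map (fun i : Nat => (i : Int))) (-1) 0
            else PySem.List.pyGetD (T.map (fun i : Nat => (i : Int)))
              (PySem.Int.mod amount (↑T.length : Int) - 1) 0 := by
      intro Hoth
      have hfin := pvFinal vals t last x hle hxmem htpos (by rw [← hT, ← hc]; exact Hoth)
      rw [← hT, ← hc] at hfin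
      rw [hfin, hmodeq]
      by_cases hmz : t % c = 0
      · rw [if_pos hmz, if_pos (by simp [hmz]), pvLast T htne]
      · rw [if_neg hmz, if_neg (by simp only [beq_iff_eq, Nat.cast_eq_zero]; exact hmz),
          pvAt T (t % c) (Nat.pos_of_ne_zero hmz) (le_of_lt (by rw [← hc]; exact Nat.mod_lt _ hcpos))]
    by_cases hrest : List.filter (fun v => decide (v < x)) vals ≠ []
    · rw [if_pos hrest]
      obtain ⟨m2, hm2⟩ : ∃ m2, PySem.List.max? (List.filter (fun v => decide (v < x)) vals) (fun y => y) = some m2 := by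
        cases h2 : PySem.List.max? (List.filter (fun v => decide (v < x)) vals) (fun y => y) with
        | none => exact absurd ((PySem.List.max?_eq_none_iff _ _).mp h2) hrest
        | some m2 => exact ⟨m2, rfl⟩
      rw [hm2]
      dsimp only
      have hm2lt : m2 < x := by
        have := PySem.List.max?_mem hm2
        have := List.of_mem_filter this
        simpa using this
      have hothers : ∀ v ∈ vals, v ≠ x → v ≤ m2 := by
        intro v hv hvx
        exact PySem.List.max?_isMax hm2 v (List.mem_filter.mpr ⟨hv, by
          simp only [decide_eq_true_eq]
          have := hle v hv
          omega⟩)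
      set dN := (x - m2).toNat with hdNdef
      have hdN : ((dN : Nat) : Int) = x - m2 := by omega
      have hdNpos : 0 < dN := by omega
      by_cases hA : (x - m2) * (↑T.length : Int) ≤ amount
      · have hdcnt : dN * c ≤ t := by
          rw [hTlen, hamount, ← hdN] at hA
          exact_mod_cast hA
        rw [dif_pos ⟨hA, by
          rw [hTlen]
          have : (0 : Int) < (c : Int) := by exact_mod_cast hcpos
          have h6 : (0 : Int) < x - m2 := by omega
          positivity⟩]
        have hdeep := pvDeep dN vals t last x hdNpos hle
          (fun v hv hvx => by have := hothers v hv hvx; omega) htne (by rw [← hT, ← hc]; exact hdcnt)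
        rw [← hT, ← hc] at hdeep
        rw [hdeep]
        have hvals' : vals.map (fun v => if (v == x) = true then v - (x - m2) else v)
            = vals.map (fun v => if v = x then v - ((dN : Nat) : Int) else v) := by
          simp only [beq_iff_eq, hdN]
        have hlastB : PySem.List.pyGetD (T.map (fun i : Nat => (i : Int))) (-1) 0
            = ((T.getLast?.getD 0 : Nat) : Int) := pvLast T htne
        have hamt' : amount - (x - m2) * (↑T.length : Int) = ((t - dN * c : Nat) : Int) := by
          rw [hTlen, hamount, ← hdN]
          push_cast [Nat.cast_sub hdcnt]
          ring
        rw [hvals', hlastB, hamt']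
        by_cases hz : t - dN * c = 0
        · rw [hz]
          rw [theIndexLoopB]
          norm_num [theIndexLoop]
        · have hcpos' : 0 < dN * c := Nat.mul_pos hdNpos hcpos
          have := ih (vals.map (fun v => if v = x then v - ((dN : Nat) : Int) else v))
            ((t - dN * c : Nat) : Int) ((T.getLast?.getD 0 : Nat) : Int)
            (by simp [hne]) (by exact_mod_cast Nat.pos_of_ne_zero hz) (by
              rw [Int.toNat_natCast]
              omega)
          rw [← this, Int.toNat_natCast]
      · rw [dif_neg (fun hco => hA hco.1)]
        apply hfinal
        intro v hv hvx
        have h7 := hothers v hv hvx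
        have hqlt : t / c < dN := by
          rw [Nat.div_lt_iff_lt_mul hcpos]
          rw [hTlen, hamount, ← hdN] at hA
          have : ¬ ((dN : Int) * (c : Int) ≤ (t : Int)) := hA
          push_cast at this
          exact_mod_cast by omega
        omega
    · rw [if_neg hrest]
      apply hfinal
      intro v hv hvx
      exfalso
      have : v ∈ List.filter (fun v => decide (v < x)) vals := List.mem_filter.mpr ⟨hv, by
        simp only [decide_eq_true_eq]
        have := hle v hv
        omega⟩
      rw [not_ne_iff.mp hrest] at this
      simp at this

-- ===== VERDICT (by name: the statement is the Claim_ definition above) =====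
theorem theIndex_spec : Claim_equal_theIndex := by
  intro carrots amount _ hpre
  unfold Spec_theIndex theIndex theIndex_alt
  by_cases h : amount ≤ 0
  · simp [h, theIndexLoop, Int.toNat_of_nonpos h]
  · have hpos : 0 < amount := by omega
    simp only [if_neg h]
    exact pvMain amount.toNat carrots amount 0 (hpre hpos) hpos le_rfl
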